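-- pv_equiv track=rewrite | github.com/ShidehHashemian/NLP-fall-2020 | Assignment_2/classifier.py | count_vector_constructor
-- ===== SOURCE A (Python) =====
-- def count_vector_constructor(doc_indexed_arr, features_index):
--     """
--     :param doc_indexed_arr: an array of indexed news
--     :param features_index: an array of features index (it could be keys of index2word or word2index base on the level)
--     :return: a 2_dimensions array which array[i][j] shows number of appearance of feature j in document i
--     """
--     doc_count_vec = list()
--     for news_arr in doc_indexed_arr:
--         count_arr = list()
--         for feature in features_index:
--             count_arr.append(news_arr.count(feature))
--         doc_count_vec.append(count_arr)
--     return doc_count_vec  # Return doc_count_vec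
-- ===== SOURCE B (Python) =====
-- def count_vector_constructor(doc_indexed_arr, features_index):
--     # inverted index: feature value -> all column positions it occupies
--     cols = {}
--     for j, f in enumerate(features_index):
--         cols.setdefault(f, []).append(j)
--     doc_count_vec = []
--     for news_arr in doc_indexed_arr:
--         vec = [0] * len(features_index)
--         for tok in news_arr:
--             for j in cols.get(tok, ()):
--                 vec[j] += 1
--         doc_count_vec.append(vec)
--     return doc_count_vec
-- ===== Notes on version B (the rewrite author's own statement) =====
-- stated objective: faster
-- what changed: B builds an inverted index from each feature value to its column positions once, then for each document fills a zero vector in a single pass over the tokens, incrementing the columns of each token, instead of rescanning the whole document with list.count for every feature.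
import Mathlib
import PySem

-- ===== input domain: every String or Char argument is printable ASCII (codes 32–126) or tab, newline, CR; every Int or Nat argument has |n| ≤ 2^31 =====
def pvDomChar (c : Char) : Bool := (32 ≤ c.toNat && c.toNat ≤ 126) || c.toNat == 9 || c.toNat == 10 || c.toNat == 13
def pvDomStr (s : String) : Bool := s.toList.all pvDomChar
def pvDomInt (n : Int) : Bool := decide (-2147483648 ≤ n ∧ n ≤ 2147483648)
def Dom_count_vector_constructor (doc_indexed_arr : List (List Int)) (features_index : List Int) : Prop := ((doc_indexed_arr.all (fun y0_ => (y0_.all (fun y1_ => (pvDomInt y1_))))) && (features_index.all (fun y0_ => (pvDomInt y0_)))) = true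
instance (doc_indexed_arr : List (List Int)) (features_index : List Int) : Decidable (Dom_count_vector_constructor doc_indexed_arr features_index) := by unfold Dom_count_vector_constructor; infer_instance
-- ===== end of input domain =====

-- B builds an inverted index feature→column positions once, then fills each document's
-- zero vector in one pass over its tokens (faster than rescanning per feature).


-- ===== PORT A =====
-- literal transliteration of A: nested append-folds, inner news_arr.count per feature
def count_vector_constructor (doc_indexed_arr : List (List Int)) (features_index : List Int) : List (List Int) :=
  doc_indexed_arr.foldl (fun doc_count_vec news_arr =>
    doc_count_vec ++ [features_index.foldl (fun count_arr feature =>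
      count_arr ++ [(news_arr.count feature : Int)]) []]) []

-- ===== PORT B =====
-- B: cols = {} ; for j, f in enumerate(features_index): cols.setdefault(f, []).append(j)
-- (setdefault-then-append has the same dict effect as inserting the extended list)
def count_vector_constructor_alt (doc_indexed_arr : List (List Int)) (features_index : List Int) : List (List Int) :=
  let cols : PySem.Dict Int (List Nat) :=
    (PySem.List.enumerate features_index 0).foldl
      (fun d p => d.insert p.2 (d.getD p.2 [] ++ [p.1.toNat])) PySem.Dict.empty
  doc_indexed_arr.foldl (fun doc_count_vec news_arr =>
    doc_count_vec ++ [news_arr.foldl (fun vec tok =>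
      (cols.getD tok []).foldl (fun v j => v.set j (v.getD j 0 + 1)) vec)
      (List.replicate features_index.length 0)]) []

-- ===== PRECONDITION & SPEC =====
def Spec_count_vector_constructor (doc_indexed_arr : List (List Int)) (features_index : List Int) (out : List (List Int)) : Prop := out = count_vector_constructor_alt doc_indexed_arr features_index
instance (doc_indexed_arr : List (List Int)) (features_index : List Int) (out : List (List Int)) : Decidable (Spec_count_vector_constructor doc_indexed_arr features_index out) := by unfold Spec_count_vector_constructor; infer_instance

-- ===== CLAIM (what is proved, stated in full; the proofs are below) =====
def Claim_equal_count_vector_constructor : Prop := ∀ (doc_indexed_arr : List (List Int)) (features_index : List Int), Dom_count_vector_constructor doc_indexed_arr features_index → Spec_count_vector_constructor doc_indexed_arr features_index (count_vector_constructor doc_indexed_arr features_index)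

-- ===== LEMMAS AND PROOFS =====

-- the column positions of feature value f, in order
def cvcIdx (features : List Int) (f : Int) : List Nat :=
  (PySem.List.enumerate features 0).filterMap
    (fun p => if p.2 = f then some p.1.toNat else none)

-- the inverted-index fold's lookup
theorem cvc_cols_getD (ps : List (Int × Int)) (d : PySem.Dict Int (List Nat)) (f : Int) :
    (ps.foldl (fun d p => d.insert p.2 (d.getD p.2 [] ++ [p.1.toNat])) d).getD f []
      = d.getD f [] ++ ps.filterMap (fun p => if p.2 = f then some p.1.toNat else none) := by
  induction ps generalizing d with
  | nil => simp
  | cons p ps ih =>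
      simp only [List.foldl, List.filterMap]
      rw [ih, PySem.Dict.getD_insert]
      by_cases h : f = p.2
      · subst h; simp
      · simp [h, Ne.symm h]

theorem cvc_cols (features : List Int) (f : Int) :
    ((PySem.List.enumerate features 0).foldl
      (fun d p => d.insert p.2 (d.getD p.2 [] ++ [p.1.toNat])) PySem.Dict.empty).getD f []
      = cvcIdx features f := by
  rw [cvc_cols_getD]; simp [cvcIdx]

theorem cvcIdx_mem (features : List Int) (f : Int) (j : Nat) :
    j ∈ cvcIdx features f ↔ ∃ h : j < features.length, features[j] = f := by
  constructor
  · intro hj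
    rcases List.mem_filterMap.mp hj with ⟨p, hp, hpf⟩
    rcases (PySem.List.mem_enumerate_iff _ _ _).mp hp with ⟨k, hk, rfl⟩
    by_cases h : features[k] = f
    · simp [h] at hpf; subst hpf; simpa using ⟨hk, h⟩
    · simp [h] at hpf
  · rintro ⟨h, hf⟩
    apply List.mem_filterMap.mpr
    refine ⟨((j : Int), features[j]), ?_, by simp [hf]⟩
    exact (PySem.List.mem_enumerate_iff _ _ _).mpr ⟨j, h, by simp⟩

theorem cvcIdx_nodup (features : List Int) (f : Int) : (cvcIdx features f).Nodup := by
  have hpw := PySem.List.pairwise_lt_enumerate (xs := features) (s := 0)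
  have hnn : ∀ p ∈ PySem.List.enumerate features 0, 0 ≤ p.1 := by
    intro p hp
    rcases (PySem.List.mem_enumerate_iff _ _ _).mp hp with ⟨k, hk, rfl⟩
    simp
  have hlt : (cvcIdx features f).Pairwise (· < ·) := by
    unfold cvcIdx
    rw [List.pairwise_filterMap]
    refine hpw.imp_of_mem (fun {p q} hp hq hpq => ?_)
    intro b hb b' hb'
    have hp0 : 0 ≤ p.1 := hnn p hp
    by_cases h1 : p.2 = f
    · simp [h1] at hb
      by_cases h2 : q.2 = f
      · simp [h2] at hb'
        subst hb; subst hb'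
        omega
      · simp [h2] at hb'
    · simp [h1] at hb
  exact hlt.imp (fun h => Nat.ne_of_lt h)

theorem cvcIdx_count (features : List Int) (f : Int) (i : Nat) (hi : i < features.length) :
    (cvcIdx features f).count i = if features[i] = f then 1 else 0 := by
  by_cases h : features[i] = f
  · simp only [h, if_true]
    exact List.count_eq_one_of_mem (cvcIdx_nodup features f)
      ((cvcIdx_mem features f i).mpr ⟨hi, h⟩)
  · simp only [h, if_false]
    exact List.count_eq_zero.mpr (fun hm => h (((cvcIdx_mem features f i).mp hm).2))

-- increment loop: length preserved
theorem cvc_inc_length (L : List Nat) (v : List Int) :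
    (L.foldl (fun v j => v.set j (v.getD j 0 + 1)) v).length = v.length := by
  induction L generalizing v with
  | nil => rfl
  | cons j L ih =>
      simp only [List.foldl]
      rw [ih]
      simp

-- increment loop: an in-range entry grows by the multiplicity of its index in L
theorem cvc_inc_getD (L : List Nat) (v : List Int) (i : Nat) (hi : i < v.length) :
    (L.foldl (fun v j => v.set j (v.getD j 0 + 1)) v).getD i 0
      = v.getD i 0 + (L.count i : Int) := by
  induction L generalizing v with
  | nil => simp
  | cons j L ih =>
      simp only [List.foldl]
      rw [ih _ (by simpa using hi), List.count_cons]
      by_cases h : i = j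
      · subst h
        rw [List.getD_eq_getElem?_getD, List.getElem?_set_self hi]
        simp [List.getD_eq_getElem?_getD]
        ring
      · rw [List.getD_eq_getElem?_getD, List.getElem?_set_ne (by omega)]
        simp [List.getD_eq_getElem?_getD]
        omega

-- token loop over a document: entry i ends at news.count features[i]
theorem cvc_tok (features : List Int) (news : List Int) (v : List Int) (i : Nat)
    (hv : v.length = features.length) (hi : i < features.length) :
    (news.foldl (fun vec tok =>
        ((cvcIdx features tok).foldl (fun v j => v.set j (v.getD j 0 + 1)) vec)) v).getD i 0
      = v.getD i 0 + (news.count features[i] : Int) := by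
  induction news generalizing v with
  | nil => simp
  | cons tok news ih =>
      simp only [List.foldl]
      rw [ih _ (by rw [cvc_inc_length]; exact hv),
        cvc_inc_getD _ _ _ (by omega), cvcIdx_count features tok i hi, List.count_cons]
      by_cases h : tok = features[i]
      · simp [h]; ring
      · simp [h]
        exact fun hh => h hh.symm

theorem cvc_tok_length (features : List Int) (news : List Int) (v : List Int) :
    (news.foldl (fun vec tok =>
        ((cvcIdx features tok).foldl (fun v j => v.set j (v.getD j 0 + 1)) vec)) v).length
      = v.length := by
  induction news generalizing v with
  | nil => rfl
  | cons tok news ih =>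
      simp only [List.foldl]
      rw [ih, cvc_inc_length]

-- B's row equals A's row
theorem cvc_row (features news : List Int) :
    (news.foldl (fun vec tok =>
        ((cvcIdx features tok).foldl (fun v j => v.set j (v.getD j 0 + 1)) vec))
      (List.replicate features.length 0))
      = features.map (fun f => (news.count f : Int)) := by
  have hlen := (cvc_tok_length features news (List.replicate features.length 0)).trans
    (by simp : (List.replicate features.length (0:Int)).length = features.length)
  simp only [List.getD_eq_getElem?_getD] at hlen
  apply List.ext_getElem (by simp [hlen])
  intro i h1 h2
  have hi : i < features.length := by simpa using h2
  have hrep : (List.replicate features.length (0:Int)).length = features.length := by simp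
  have := cvc_tok features news (List.replicate features.length 0) i hrep hi
  rw [List.getD_eq_getElem?_getD, List.getElem?_eq_getElem h1] at this
  simp only [List.getElem_map]
  simp [List.getD_eq_getElem?_getD, List.getElem?_eq_getElem (by simpa using hi :
    i < (List.replicate features.length (0:Int)).length)] at this
  simp [this]

-- A's inner fold builds the mapped row
theorem cvc_inner (features : List Int) (news : List Int) (init : List Int) :
    features.foldl (fun count_arr feature => count_arr ++ [(news.count feature : Int)]) init
      = init ++ features.map (fun f => (news.count f : Int)) := by
  induction features generalizing init with
  | nil => simp
  | cons f fs ih => simp [List.foldl, ih]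

theorem cvc_outer (docs : List (List Int)) (features : List Int) (init : List (List Int)) :
    docs.foldl (fun acc news =>
      acc ++ [features.foldl (fun ca f => ca ++ [(news.count f : Int)]) []]) init
    = docs.foldl (fun acc news =>
      acc ++ [news.foldl (fun vec tok =>
        ((cvcIdx features tok).foldl (fun v j => v.set j (v.getD j 0 + 1)) vec))
        (List.replicate features.length 0)]) init := by
  induction docs generalizing init with
  | nil => rfl
  | cons news rest ih =>
      simp only [List.foldl]
      rw [cvc_inner, cvc_row, ih]
      simp

-- ===== VERDICT (by name: the statement is the Claim_ definition above) =====
theorem count_vector_constructor_spec : Claim_equal_count_vector_constructor := by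
  intro docs features _
  unfold Spec_count_vector_constructor count_vector_constructor count_vector_constructor_alt
  rw [cvc_outer]
  simp only [cvc_cols]
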